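-- pv_equiv track=rewrite | github.com/pranavthaivalappil/ai-prep-mentor | prepinsta50/strings/05_ascii_values.py | shift_ascii_values
-- ===== SOURCE A (Python) =====
-- def shift_ascii_values(s, shift):
--     """
--     Shift ASCII values by a given amount (Caesar cipher style)
--
--     Args:
--         s (str): Input string
--         shift (int): Amount to shift ASCII values
--
--     Returns:
--         str: String with shifted ASCII values
--     """
--     result = ""
--
--     for char in s:
--         new_ascii = ord(char) + shift
--         # Keep within printable ASCII range (32-126)
--         if 32 <= new_ascii <= 126:
--             result += chr(new_ascii)
--         else:
--             result += char  # Keep original if out of range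
--
--     return result
-- ===== SOURCE B (Python) =====
-- def shift_ascii_values(s, shift):
--     table = {}
--     for c in set(s):
--         new = ord(c) + shift
--         if 32 <= new <= 126:
--             table[ord(c)] = chr(new)
--     return s.translate(table)
-- ===== Notes on version B (the rewrite author's own statement) =====
-- stated objective: faster
-- what changed: B precomputes a translation table over the distinct characters of s (omitting out-of-range shifts so translate leaves them unchanged) and applies str.translate in one C-level pass, instead of A's per-character branch-and-concatenate loop.
import Mathlib
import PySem

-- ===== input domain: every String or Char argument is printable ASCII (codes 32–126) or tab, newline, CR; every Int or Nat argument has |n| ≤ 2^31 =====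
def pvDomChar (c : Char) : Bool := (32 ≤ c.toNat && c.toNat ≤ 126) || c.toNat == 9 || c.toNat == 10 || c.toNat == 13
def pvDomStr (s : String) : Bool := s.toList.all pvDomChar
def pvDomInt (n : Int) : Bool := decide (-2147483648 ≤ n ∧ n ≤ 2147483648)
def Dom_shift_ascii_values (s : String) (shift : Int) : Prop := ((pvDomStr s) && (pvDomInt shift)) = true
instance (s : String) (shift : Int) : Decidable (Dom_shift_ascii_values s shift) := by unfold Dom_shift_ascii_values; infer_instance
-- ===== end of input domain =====

-- B is the idiomatic table-and-translate version; A is the per-character branch-and-append loop.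

-- ===== PORT A =====
def shift_ascii_values (s : String) (shift : Int) : String :=
  String.mk (s.toList.foldl (fun result char =>
    let newAscii : Int := (char.toNat : Int) + shift
    if 32 ≤ newAscii ∧ newAscii ≤ 126 then
      result ++ [Char.ofNat newAscii.toNat]
    else
      result ++ [char]) [])

-- ===== PORT B =====
-- the translation table: for each distinct character of s, ord(c) ↦ chr(ord(c)+shift) when in range
def pvTableStep (shift : Int) (table : PySem.Dict Int Char) (c : Char) : PySem.Dict Int Char :=
  let new : Int := (c.toNat : Int) + shift
  if 32 ≤ new ∧ new ≤ 126 then table.insert (c.toNat : Int) (Char.ofNat new.toNat)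
  else table

def pvTable (s : String) (shift : Int) : PySem.Dict Int Char :=
  (PySem.Set.ofList s.toList).foldl (pvTableStep shift) PySem.Dict.empty

-- s.translate(table): each char is replaced by its table entry, or kept if unmapped
def shift_ascii_values_alt (s : String) (shift : Int) : String :=
  String.mk (s.toList.map (fun c =>
    match (pvTable s shift).get? ((c.toNat : Int)) with
    | some r => r
    | none => c))

-- ===== PRECONDITION & SPEC =====
def Spec_shift_ascii_values (s : String) (shift : Int) (out : String) : Prop := out = shift_ascii_values_alt s shift
instance (s : String) (shift : Int) (out : String) : Decidable (Spec_shift_ascii_values s shift out) := by unfold Spec_shift_ascii_values; infer_instance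

-- ===== CLAIM (what is proved, stated in full; the proofs are below) =====
def Claim_equal_shift_ascii_values : Prop := ∀ (s : String) (shift : Int), Dom_shift_ascii_values s shift → Spec_shift_ascii_values s shift (shift_ascii_values s shift)

-- ===== LEMMAS AND PROOFS =====

-- inserting only other keys leaves a lookup unchanged
theorem pvTable_get?_other (shift : Int) (cs : List Char) (d : PySem.Dict Int Char) (k : Int)
    (h : ∀ c ∈ cs, ((c.toNat : Int)) ≠ k) :
    (cs.foldl (pvTableStep shift) d).get? k = d.get? k := by
  induction cs generalizing d with
  | nil => rfl
  | cons hd tl ih =>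
    simp only [List.foldl_cons]
    rw [ih _ (fun c hc => h c (List.mem_cons_of_mem _ hc))]
    by_cases hcond : 32 ≤ (hd.toNat : Int) + shift ∧ (hd.toNat : Int) + shift ≤ 126
    · simp only [pvTableStep, if_pos hcond]
      exact PySem.Dict.get?_insert_of_ne _ _ (Ne.symm (h hd (List.mem_cons_self)))
    · simp only [pvTableStep, if_neg hcond]

-- lookup of a member's key in the table built over a key-distinct list
theorem pvTable_get?_mem (shift : Int) (cs : List Char) (d : PySem.Dict Int Char) (c : Char)
    (hnd : (cs.map (fun c => ((c.toNat : Int)))).Nodup) (hc : c ∈ cs) :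
    (cs.foldl (pvTableStep shift) d).get? ((c.toNat : Int)) =
      if 32 ≤ (c.toNat : Int) + shift ∧ (c.toNat : Int) + shift ≤ 126 then
        some (Char.ofNat ((c.toNat : Int) + shift).toNat)
      else d.get? ((c.toNat : Int)) := by
  induction cs generalizing d with
  | nil => cases hc
  | cons hd tl ih =>
    simp only [List.map_cons, List.nodup_cons] at hnd
    rcases List.mem_cons.mp hc with rfl | hmem
    · have hnot : ∀ c' ∈ tl, ((c'.toNat : Int)) ≠ ((c.toNat : Int)) := by
        intro c' hc' heq
        exact hnd.1 (heq ▸ List.mem_map_of_mem hc')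
      simp only [List.foldl_cons]
      rw [pvTable_get?_other shift tl _ _ hnot]
      by_cases hcond : 32 ≤ (c.toNat : Int) + shift ∧ (c.toNat : Int) + shift ≤ 126
      · simp only [pvTableStep, if_pos hcond, PySem.Dict.get?_insert_self]
      · simp only [pvTableStep, if_neg hcond]
    · simp only [List.foldl_cons]
      rw [ih _ hnd.2 hmem]
      split
      · rfl
      · by_cases hcond : 32 ≤ (hd.toNat : Int) + shift ∧ (hd.toNat : Int) + shift ≤ 126
        · simp only [pvTableStep, if_pos hcond]
          have hne : ((c.toNat : Int)) ≠ ((hd.toNat : Int)) := by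
            intro heq
            exact hnd.1 (heq ▸ List.mem_map_of_mem hmem)
          exact PySem.Dict.get?_insert_of_ne _ _ hne
        · simp only [pvTableStep, if_neg hcond]

theorem char_key_injective : Function.Injective (fun c : Char => ((c.toNat : Int))) := by
  intro a b h
  have hi : ((a.toNat : Int)) = ((b.toNat : Int)) := h
  have hn : a.toNat = b.toNat := by exact_mod_cast hi
  exact Char.ext (UInt32.toNat_inj.mp hn)

-- ===== VERDICT (by name: the statement is the Claim_ definition above) =====
theorem shift_ascii_values_spec : Claim_equal_shift_ascii_values := by
  intro s shift _
  unfold Spec_shift_ascii_values shift_ascii_values shift_ascii_values_alt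
  congr 1
  have hA : s.toList.foldl (fun result char =>
      let newAscii : Int := (char.toNat : Int) + shift
      if 32 ≤ newAscii ∧ newAscii ≤ 126 then result ++ [Char.ofNat newAscii.toNat]
      else result ++ [char]) [] =
      s.toList.map (fun c =>
        if 32 ≤ (c.toNat : Int) + shift ∧ (c.toNat : Int) + shift ≤ 126 then
          Char.ofNat ((c.toNat : Int) + shift).toNat
        else c) := by
    have : (fun (result : List Char) (char : Char) =>
        let newAscii : Int := (char.toNat : Int) + shift
        if 32 ≤ newAscii ∧ newAscii ≤ 126 then result ++ [Char.ofNat newAscii.toNat]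
        else result ++ [char]) =
        fun result char => result ++ [if 32 ≤ (char.toNat : Int) + shift ∧ (char.toNat : Int) + shift ≤ 126 then
          Char.ofNat ((char.toNat : Int) + shift).toNat else char] := by
      funext r c
      simp only
      split <;> rfl
    rw [this, PySem.List.foldl_append_singleton_eq_map]
    simp
  rw [hA]
  apply List.map_congr_left
  intro c hc
  have hnd : ((PySem.Set.ofList s.toList).map (fun c => ((c.toNat : Int)))).Nodup :=
    (PySem.Set.nodup_ofList s.toList).map char_key_injective
  have hmem : c ∈ PySem.Set.ofList s.toList := (PySem.Set.mem_ofList s.toList c).mpr hc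
  unfold pvTable
  rw [pvTable_get?_mem shift _ _ c hnd hmem]
  split <;> simp [PySem.Dict.get?_empty]
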